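-- pv_equiv track=rewrite | github.com/drmext/ddr-datatools | ddr-render.py | get_sanitized_filename
-- ===== SOURCE A (Python) =====
-- def get_sanitized_filename(filename):
--     homoglyphs = {
--             '\\' : '＼',
--             '/' : '⁄',
--             ':' : '։',
--             '*' : '⁎',
--             '?' : '？',
--             '"' : '',
--             '<' : '‹',
--             '>' : '›',
--             '|' : 'ǀ',
--         }
--     for bad, good in homoglyphs.items():
--         filename = filename.replace(bad, good)
--     return filename
-- ===== SOURCE B (Python) =====
-- def get_sanitized_filename(filename):
--     table = str.maketrans({
--             '\\' : '＼',
--             '/' : '⁄',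
--             ':' : '։',
--             '*' : '⁎',
--             '?' : '？',
--             '"' : None,
--             '<' : '‹',
--             '>' : '›',
--             '|' : 'ǀ',
--         })
--     return filename.translate(table)
-- ===== Notes on version B (the rewrite author's own statement) =====
-- stated objective: idiomatic
-- what changed: B builds one translation table and rewrites the string in a single character-by-character pass via str.translate (with '"' mapped to deletion), instead of A's nine successive whole-string replace passes.
import Mathlib
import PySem

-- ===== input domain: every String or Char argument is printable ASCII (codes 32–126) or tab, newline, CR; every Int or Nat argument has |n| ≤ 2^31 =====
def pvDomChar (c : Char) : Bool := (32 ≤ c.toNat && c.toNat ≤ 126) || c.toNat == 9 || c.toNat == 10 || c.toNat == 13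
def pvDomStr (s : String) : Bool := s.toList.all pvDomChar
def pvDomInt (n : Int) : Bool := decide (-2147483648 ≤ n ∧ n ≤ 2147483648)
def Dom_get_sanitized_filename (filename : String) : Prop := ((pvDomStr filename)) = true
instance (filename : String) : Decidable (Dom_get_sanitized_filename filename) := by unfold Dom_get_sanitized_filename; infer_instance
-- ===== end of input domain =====

-- B replaces A's nine whole-string replace passes by one translation table and a single
-- character-by-character pass (idiomatic str.translate); same return value on every input.

-- ===== PORT A =====
-- the dict's items in insertion order (dict → association list per convention)
def pvHomoglyphs : List (String × String) :=
  [("\\", "＼"), ("/", "⁄"), (":", "։"), ("*", "⁎"), ("?", "？"),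
   ("\"", ""), ("<", "‹"), (">", "›"), ("|", "ǀ")]

-- for bad, good in homoglyphs.items(): filename = filename.replace(bad, good)
def get_sanitized_filename (filename : String) : String :=
  pvHomoglyphs.foldl (fun acc p => PySem.Str.replace acc p.1 p.2) filename

-- ===== PORT B =====
-- the str.maketrans table: char → replacement codepoints ('"' → None, i.e. deletion → [])
def pvTable : List (Char × List Char) :=
  [('\\', ['＼']), ('/', ['⁄']), (':', ['։']), ('*', ['⁎']), ('?', ['？']),
   ('"', []), ('<', ['‹']), ('>', ['›']), ('|', ['ǀ'])]

-- str.translate is not in PySem: ported by hand, exact — one lookup per code point,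
-- unmapped code points kept, a None entry deletes.
def pvTranslateChar (c : Char) : List Char :=
  match pvTable.lookup c with
  | some r => r
  | none => [c]

def get_sanitized_filename_alt (filename : String) : String :=
  String.ofList (filename.toList.flatMap pvTranslateChar)

-- ===== PRECONDITION & SPEC =====
def Spec_get_sanitized_filename (filename : String) (out : String) : Prop := out = get_sanitized_filename_alt filename
instance (filename : String) (out : String) : Decidable (Spec_get_sanitized_filename filename out) := by unfold Spec_get_sanitized_filename; infer_instance

-- ===== CLAIM (what is proved, stated in full; the proofs are below) =====
def Claim_equal_get_sanitized_filename : Prop := ∀ (filename : String), Dom_get_sanitized_filename filename → Spec_get_sanitized_filename filename (get_sanitized_filename filename)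

-- ===== LEMMAS AND PROOFS =====

-- A single-character replace is a flatMap over the characters.
theorem pv_replace_go_single (b : Char) (g : List Char) :
    ∀ (l acc : List Char) (fuel : Nat), l.length ≤ fuel →
      PySem.Chars.replace.go [b] g fuel l acc
        = acc.reverse ++ l.flatMap (fun c => if c == b then g else [c]) := by
  intro l
  induction l with
  | nil =>
    intro acc fuel _
    cases fuel <;> simp [PySem.Chars.replace.go]
  | cons c t ih =>
    intro acc fuel hf
    cases fuel with
    | zero => simp at hf
    | succ f =>
      simp only [PySem.Chars.replace.go]
      by_cases h : c = b
      · subst h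
        simp [List.isPrefixOf, ih (g.reverse ++ acc) f (by simpa using hf)]
      · have hb : (b == c) = false := by simp [beq_eq_false_iff_ne]; exact fun e => h e.symm
        have hc : (c == b) = false := by simp [beq_eq_false_iff_ne]; exact h
        simp [List.isPrefixOf, hb, h, ih (c :: acc) f (by simpa using hf)]

theorem pv_replace_single (cs : List Char) (b : Char) (g : List Char) :
    PySem.Chars.replace cs [b] g = cs.flatMap (fun c => if c == b then g else [c]) := by
  simp [PySem.Chars.replace, pv_replace_go_single b g cs [] cs.length (le_refl _)]

-- the A-side chain of nine flatMaps, on character lists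
def pvChain (cs : List Char) : List Char :=
  pvTable.foldl (fun cs p => cs.flatMap (fun c => if c == p.1 then p.2 else [c])) cs

theorem pv_foldl_flatMap_append (t : List (Char × List Char)) (xs ys : List Char) :
    t.foldl (fun cs p => cs.flatMap (fun c => if c == p.1 then p.2 else [c])) (xs ++ ys)
      = t.foldl (fun cs p => cs.flatMap (fun c => if c == p.1 then p.2 else [c])) xs
        ++ t.foldl (fun cs p => cs.flatMap (fun c => if c == p.1 then p.2 else [c])) ys := by
  induction t generalizing xs ys with
  | nil => rfl
  | cons p t ih => simp only [List.foldl_cons, List.flatMap_append, ih]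

theorem pv_chain_append (xs ys : List Char) :
    pvChain (xs ++ ys) = pvChain xs ++ pvChain ys := by
  unfold pvChain
  exact pv_foldl_flatMap_append pvTable xs ys

theorem pv_chain_single (c : Char) : pvChain [c] = pvTranslateChar c := by
  by_cases h1 : c = '\\'; · subst h1; decide
  by_cases h2 : c = '/'; · subst h2; decide
  by_cases h3 : c = ':'; · subst h3; decide
  by_cases h4 : c = '*'; · subst h4; decide
  by_cases h5 : c = '?'; · subst h5; decide
  by_cases h6 : c = '"'; · subst h6; decide
  by_cases h7 : c = '<'; · subst h7; decide
  by_cases h8 : c = '>'; · subst h8; decide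
  by_cases h9 : c = '|'; · subst h9; decide
  have e1 : (c == '\\') = false := by simp [h1]
  have e2 : (c == '/') = false := by simp [h2]
  have e3 : (c == ':') = false := by simp [h3]
  have e4 : (c == '*') = false := by simp [h4]
  have e5 : (c == '?') = false := by simp [h5]
  have e6 : (c == '"') = false := by simp [h6]
  have e7 : (c == '<') = false := by simp [h7]
  have e8 : (c == '>') = false := by simp [h8]
  have e9 : (c == '|') = false := by simp [h9]
  simp [pvChain, pvTable, pvTranslateChar, List.lookup, e1, e2, e3, e4, e5, e6, e7, e8, e9, h1, h2, h3, h4, h5, h6, h7, h8, h9]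

theorem pv_chain_eq_flatMap (cs : List Char) :
    pvChain cs = cs.flatMap pvTranslateChar := by
  induction cs with
  | nil => rfl
  | cons c t ih =>
    have h : (c :: t) = [c] ++ t := rfl
    rw [h, pv_chain_append, pv_chain_single, ih]
    simp

theorem pv_A_eq_chain (s : String) :
    get_sanitized_filename s = String.ofList (pvChain s.toList) := by
  simp [get_sanitized_filename, pvHomoglyphs, pvChain, pvTable,
        PySem.Str.replace, pv_replace_single]

-- ===== VERDICT (by name: the statement is the Claim_ definition above) =====
theorem get_sanitized_filename_spec : Claim_equal_get_sanitized_filename := by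
  intro s _
  show get_sanitized_filename s = get_sanitized_filename_alt s
  rw [pv_A_eq_chain, pv_chain_eq_flatMap]
  rfl
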